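-- pv_equiv track=rewrite | github.com/pulkitkatdare/baby-ai-game | pytorch_rl/preProcess.py | stringDecoder
-- ===== SOURCE A (Python) =====
-- def stringDecoder(code):
--     '''
--     decode a pytorch Tensor containing the ASCII codes of the original string
--     '''
--     string=''
--     for x in code:
--         if int(x)==0:
--             return(string)
--         else:
--             string+=chr(int(x))
--     return(string)
-- ===== SOURCE B (Python) =====
-- def stringDecoder(code):
--     # B: two-phase decode -- materialize codes, find the null boundary, then map one slice.
--     nums = [int(x) for x in code]
--     try:
--         cut = nums.index(0)
--     except ValueError:
--         cut = len(nums)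
--     return ''.join(chr(c) for c in nums[:cut])
-- ===== Notes on version B (the rewrite author's own statement) =====
-- stated objective: alternative
-- what changed: B replaces A's single early-exit accumulation loop by two separate phases: first locate the first null terminator with list.index (defaulting to the full length), then map chr over the slice before that boundary and join it.
import Mathlib
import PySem

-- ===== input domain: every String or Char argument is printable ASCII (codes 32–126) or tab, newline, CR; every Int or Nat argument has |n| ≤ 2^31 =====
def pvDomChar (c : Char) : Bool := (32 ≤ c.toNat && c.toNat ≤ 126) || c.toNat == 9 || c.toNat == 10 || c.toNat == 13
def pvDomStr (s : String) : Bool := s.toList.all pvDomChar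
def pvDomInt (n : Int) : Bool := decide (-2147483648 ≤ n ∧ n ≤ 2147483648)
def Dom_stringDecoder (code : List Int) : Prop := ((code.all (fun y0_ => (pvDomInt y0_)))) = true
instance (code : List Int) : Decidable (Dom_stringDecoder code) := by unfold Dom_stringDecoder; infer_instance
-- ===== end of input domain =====

-- B changes the decomposition (find the null boundary first, then map one slice) — alternative, same cost.
-- chr(n) is ported as Char.ofNat n.toNat, exact on Pre_ (codes are valid Unicode scalar values there).

-- ===== PORT A =====
-- A's loop: accumulate characters, early-return at the first 0 (string += chr(x) ↔ acc ++ [chr x]).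
def stringDecoderGo (code : List Int) (acc : List Char) : List Char :=
  match code with
  | [] => acc
  | x :: rest => if x = 0 then acc else stringDecoderGo rest (acc ++ [Char.ofNat x.toNat])

def stringDecoder (code : List Int) : String :=
  String.mk (stringDecoderGo code [])

-- ===== PORT B =====
def stringDecoder_alt (code : List Int) : String :=
  let nums := code
  let cut : Nat :=
    match PySem.List.index? nums 0 with
    | some k => k
    | none => nums.length
  String.mk ((PySem.List.slice nums none (some (cut : Int))).map (fun c => Char.ofNat c.toNat))

-- ===== PRECONDITION & SPEC =====
-- Pre_ excludes inputs whose prefix before the first 0 contains a code that is not a valid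
-- Unicode scalar value: chr raises ValueError there (negative or ≥ 0x110000), and on surrogate
-- codes 0xD800–0xDFFF Python returns a lone-surrogate string that a Lean String cannot represent.
def Pre_stringDecoder (code : List Int) : Prop :=
  ∀ x ∈ code.takeWhile (fun x => x ≠ 0), 0 ≤ x ∧ (x < 55296 ∨ (57343 < x ∧ x < 1114112))
instance (code : List Int) : Decidable (Pre_stringDecoder code) := by
  unfold Pre_stringDecoder; infer_instance
def pvWitness_stringDecoder : List Int := [72, 105, 0, 99]

def Spec_stringDecoder (code : List Int) (out : String) : Prop := out = stringDecoder_alt code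
instance (code : List Int) (out : String) : Decidable (Spec_stringDecoder code out) := by
  unfold Spec_stringDecoder; infer_instance

-- ===== CLAIM (what is proved, stated in full; the proofs are below) =====
def Claim_equal_stringDecoder : Prop := ∀ (code : List Int), Dom_stringDecoder code → Pre_stringDecoder code → Spec_stringDecoder code (stringDecoder code)

-- ===== LEMMAS AND PROOFS =====

-- A's loop produces the chr-image of the prefix before the first 0.
theorem stringDecoderGo_eq (code : List Int) (acc : List Char) :
    stringDecoderGo code acc
      = acc ++ (code.takeWhile (fun x => decide (x ≠ 0))).map (fun c => Char.ofNat c.toNat) := by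
  induction code generalizing acc with
  | nil => simp [stringDecoderGo]
  | cons x rest ih =>
    by_cases hx : x = 0
    · simp [stringDecoderGo, hx, List.takeWhile]
    · simp [stringDecoderGo, hx, List.takeWhile, ih]

-- B's boundary: taking up to the first index of 0 is takeWhile (· ≠ 0).
theorem take_index_eq_takeWhile (code : List Int) :
    (match PySem.List.index? code 0 with
      | some k => code.take k
      | none => code.take code.length)
      = code.takeWhile (fun x => decide (x ≠ 0)) := by
  induction code with
  | nil => simp [PySem.List.index?]
  | cons x rest ih =>
    by_cases hx : x = 0
    · simp [PySem.List.index?, List.idxOf?_cons, hx, List.takeWhile]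
    · rw [PySem.List.index?_cons_of_ne rest (by simpa using hx)]
      cases h : PySem.List.index? rest 0 with
      | some k =>
        rw [h] at ih
        simp only [Option.map_some]
        simp [List.takeWhile, hx, ih]
      | none =>
        rw [h] at ih
        simp only [Option.map_none]
        simp [List.takeWhile, hx, ih]

-- ===== VERDICT (by name: the statement is the Claim_ definition above) =====
theorem stringDecoder_spec : Claim_equal_stringDecoder := by
  intro code _ _
  unfold Spec_stringDecoder
  simp only [stringDecoder, stringDecoder_alt]
  rw [stringDecoderGo_eq, List.nil_append]
  have hTW := take_index_eq_takeWhile code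
  cases h : PySem.List.index? code 0 with
  | some k =>
    simp only [h] at hTW
    rw [PySem.List.slice_to code (by positivity), Int.toNat_natCast, List.map_take]
    dsimp only
    rw [← List.map_take, hTW]
  | none =>
    simp only [h, List.take_length] at hTW
    rw [PySem.List.slice_to code (by positivity), Int.toNat_natCast, List.map_take]
    dsimp only
    rw [← List.map_take, List.take_length]
    exact congrArg String.mk (congrArg (List.map fun c => Char.ofNat c.toNat) hTW.symm)
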